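-- pv_equiv track=rewrite | github.com/mirko-x/Homeworks | HW8req/Soluzione.py | AnagrammaS
-- ===== SOURCE A (Python) =====
-- def AnagrammaS(string, key):
--      #if  any(char not in string for char in key ): return False
--      keylist=[]
--      for char in key :
--          if char in string :
--              keylist.append(char)
--          else: return False
--
--      liststring = [char for char in string ]
--
--      for char in keylist:
--          if char in liststring:
--              liststring.remove(char)
--
--      return len(liststring) == 1
-- ===== SOURCE B (Python) =====
-- def AnagrammaS(string, key):
--     s = list(string)
--     k = list(key)
--     if any(c not in s for c in k):
--         return False
--     removed = sum(min(k.count(c), s.count(c)) for c in dict.fromkeys(k))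
--     return len(s) - removed == 1
-- ===== Notes on version B (the rewrite author's own statement) =====
-- stated objective: alternative
-- what changed: Replaced A's keylist construction plus repeated list.remove scans over a copy of the string by a counting formulation: check every key char occurs in the string, then sum min(key.count(c), string.count(c)) over the distinct key characters and test len(string) - removed == 1.
import Mathlib
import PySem

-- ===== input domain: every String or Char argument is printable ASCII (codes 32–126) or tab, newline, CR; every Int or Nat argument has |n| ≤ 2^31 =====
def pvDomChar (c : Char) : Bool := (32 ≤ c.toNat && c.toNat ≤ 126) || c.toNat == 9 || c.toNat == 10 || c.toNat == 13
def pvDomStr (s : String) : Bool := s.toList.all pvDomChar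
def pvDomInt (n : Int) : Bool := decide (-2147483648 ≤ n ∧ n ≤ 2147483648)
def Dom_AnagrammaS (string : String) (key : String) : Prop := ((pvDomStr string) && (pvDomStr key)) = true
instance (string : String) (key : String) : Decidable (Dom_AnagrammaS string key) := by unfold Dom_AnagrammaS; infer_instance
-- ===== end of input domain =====

-- B replaces A's build-keylist-then-repeatedly-list.remove scan by counting: it sums
-- min(count in key, count in string) over the distinct key characters and compares
-- len(string) - removed with 1 (objective: alternative/idiomatic; no speed claim).

-- ===== PORT A =====
-- first loop of A: walk key, append chars found in string, early-return False (none) otherwise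
def pvBuild (s : List Char) : List Char → List Char → Option (List Char)
  | [], acc => some acc
  | c :: rest, acc => if c ∈ s then pvBuild s rest (acc ++ [c]) else none

def AnagrammaS (string : String) (key : String) : Bool :=
  match pvBuild string.toList key.toList [] with
  | none => false
  | some keylist =>
    let liststring := string.toList
    -- second loop: for char in keylist: if char in liststring: liststring.remove(char)
    let final := keylist.foldl
      (fun l c => if c ∈ l then (PySem.List.remove? l c).getD l else l) liststring
    decide (final.length = 1)

-- ===== PORT B =====
def AnagrammaS_alt (string : String) (key : String) : Bool :=
  let s := string.toList
  let k := key.toList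
  if k.any (fun c => decide (c ∉ s)) then false
  else
    let removed := (k.dedup.map (fun c => min (k.count c) (s.count c))).sum
    decide (s.length - removed = 1)

-- ===== PRECONDITION & SPEC =====
def Spec_AnagrammaS (string : String) (key : String) (out : Bool) : Prop := out = AnagrammaS_alt string key
instance (string : String) (key : String) (out : Bool) : Decidable (Spec_AnagrammaS string key out) := by unfold Spec_AnagrammaS; infer_instance

-- ===== CLAIM (what is proved, stated in full; the proofs are below) =====
def Claim_equal_AnagrammaS : Prop := ∀ (string : String) (key : String), Dom_AnagrammaS string key → Spec_AnagrammaS string key (AnagrammaS string key)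

-- ===== LEMMAS AND PROOFS =====

-- A's first loop succeeds iff every key char occurs in the string, returning acc ++ key.
theorem pvBuild_eq (s k acc : List Char) :
    pvBuild s k acc = if ∀ c ∈ k, c ∈ s then some (acc ++ k) else none := by
  induction k generalizing acc with
  | nil => simp [pvBuild]
  | cons c rest ih =>
    by_cases hc : c ∈ s
    · rw [pvBuild, if_pos hc, ih]
      by_cases hr : ∀ x ∈ rest, x ∈ s
      · rw [if_pos hr, if_pos (by simpa [hc] using hr)]; simp
      · rw [if_neg hr, if_neg (by simp [hr])]
    · rw [pvBuild, if_neg hc, if_neg (by simp [hc])]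

-- A's removal loop is exactly list difference.
theorem fold_remove_eq_diff (k l : List Char) :
    k.foldl (fun l c => if c ∈ l then (PySem.List.remove? l c).getD l else l) l = l.diff k := by
  induction k generalizing l with
  | nil => simp
  | cons c rest ih =>
    simp only [List.foldl_cons, List.diff_cons]
    by_cases hc : c ∈ l
    · rw [if_pos hc, PySem.List.remove?_eq_some_erase _ _ hc, Option.getD_some, ih]
    · rw [if_neg hc, List.erase_of_not_mem hc, ih]

-- length of the difference, expressed as B computes it (via multisets, in small steps)
theorem pv_len_sub (l k : List Char) :
    (l.diff k).length = Multiset.card ((↑l : Multiset Char) - (↑k : Multiset Char)) := by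
  rw [Multiset.coe_sub, Multiset.coe_card]

theorem pv_sub_inter (l k : List Char) :
    ((↑l : Multiset Char) - (↑k : Multiset Char))
      = ((↑l : Multiset Char) - ((↑l : Multiset Char) ∩ (↑k : Multiset Char))) :=
  Multiset.ext.mpr (fun a => by
    rw [Multiset.count_sub, Multiset.count_sub, Multiset.count_inter]; omega)

theorem pv_card_sub (l k : List Char) :
    Multiset.card ((↑l : Multiset Char) - (↑k : Multiset Char))
      = l.length - Multiset.card ((↑l : Multiset Char) ∩ (↑k : Multiset Char)) := by
  rw [pv_sub_inter, Multiset.card_sub Multiset.inter_le_left, Multiset.coe_card]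

theorem pv_count_inter (l k : List Char) (c : Char) :
    Multiset.count c ((↑l : Multiset Char) ∩ (↑k : Multiset Char))
      = min (k.count c) (l.count c) := by
  rw [Multiset.count_inter, Multiset.coe_count, Multiset.coe_count, Nat.min_comm]

theorem pv_card_inter (l k : List Char) :
    Multiset.card ((↑l : Multiset Char) ∩ (↑k : Multiset Char))
      = ∑ c ∈ k.toFinset, min (k.count c) (l.count c) := by
  rw [← Multiset.toFinset_sum_count_eq ((↑l : Multiset Char) ∩ (↑k : Multiset Char))]
  rw [Finset.sum_subset
    (by
      intro c hc
      have hck := (Multiset.mem_inter.mp (Multiset.mem_toFinset.mp hc)).2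
      exact List.mem_toFinset.mpr (by simpa using hck))
    (by
      intro c _ hc
      exact Multiset.count_eq_zero.mpr (fun h => hc (Multiset.mem_toFinset.mpr h)))]
  exact Finset.sum_congr rfl (fun c _ => pv_count_inter l k c)

theorem pv_sum_toFinset (l k : List Char) :
    (∑ c ∈ k.toFinset, min (k.count c) (l.count c))
      = (k.dedup.map (fun c => min (k.count c) (l.count c))).sum := by
  rw [Finset.sum_eq_multiset_sum, List.toFinset_val, Multiset.map_coe, Multiset.sum_coe]

theorem diff_length (l k : List Char) :
    (l.diff k).length = l.length - (k.dedup.map (fun c => min (k.count c) (l.count c))).sum := by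
  rw [pv_len_sub, pv_card_sub, pv_card_inter, pv_sum_toFinset]

theorem pv_A_eq (string key : String) :
    AnagrammaS string key =
      if ∀ c ∈ key.toList, c ∈ string.toList then
        decide ((string.toList.diff key.toList).length = 1)
      else false := by
  unfold AnagrammaS
  rw [pvBuild_eq]
  by_cases h : ∀ c ∈ key.toList, c ∈ string.toList
  · rw [if_pos h, if_pos h]
    simp only [List.nil_append, fold_remove_eq_diff]
  · rw [if_neg h, if_neg h]

theorem pv_B_eq (string key : String) :
    AnagrammaS_alt string key =
      if ∀ c ∈ key.toList, c ∈ string.toList then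
        decide (string.toList.length -
          (key.toList.dedup.map
            (fun c => min (key.toList.count c) (string.toList.count c))).sum = 1)
      else false := by
  unfold AnagrammaS_alt
  show (if (key.toList.any fun c => decide (c ∉ string.toList)) = true then false
        else decide (string.toList.length -
          (key.toList.dedup.map
            (fun c => min (key.toList.count c) (string.toList.count c))).sum = 1)) = _
  by_cases h : ∀ c ∈ key.toList, c ∈ string.toList
  · have hany : key.toList.any (fun c => decide (c ∉ string.toList)) = false := by
      simp only [List.any_eq_false, decide_eq_true_eq]
      intro c hc
      exact fun hn => hn (h c hc)
    rw [hany, if_neg (by decide), if_pos h]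
  · have hany : key.toList.any (fun c => decide (c ∉ string.toList)) = true := by
      simp only [List.any_eq_true, decide_eq_true_eq]
      push Not at h
      exact h
    rw [hany, if_pos rfl, if_neg h]

-- ===== VERDICT (by name: the statement is the Claim_ definition above) =====
theorem AnagrammaS_spec : Claim_equal_AnagrammaS := by
  intro string key _
  unfold Spec_AnagrammaS
  rw [pv_A_eq, pv_B_eq, diff_length]
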